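-- pv_equiv track=rewrite | github.com/AnalyticalHarry/Python-And-JavaScript-Projects | PythonSortingAlgorithms/sorting_alphabet_using_bubble_sort_part2.py | name_to_numerical_value
-- ===== SOURCE A (Python) =====
-- def name_to_numerical_value(name):
--     word_mapping = {
--         'A': 1, 'a': 1, 'B': 2, 'b': 2, 'C': 3, 'c': 3, 'D': 4, 'd': 4, 'E': 5, 'e': 5,
--         'F': 6, 'f': 6, 'G': 7, 'g': 7, 'H': 8, 'h': 8, 'I': 9, 'i': 9, 'J': 10, 'j': 10,
--         'K': 11, 'k': 11, 'L': 12, 'l': 12, 'M': 13, 'm': 13, 'N': 14, 'n': 14, 'O': 15, 'o': 15,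
--         'P': 16, 'p': 16, 'Q': 17, 'q': 17, 'R': 18, 'r': 18, 'S': 19, 's': 19, 'T': 20, 't': 20,
--         'U': 21, 'u': 21, 'V': 22, 'v': 22, 'W': 23, 'w': 23, 'X': 24, 'x': 24, 'Y': 25, 'y': 25,
--         'Z': 26, 'z': 26
--     }
--     numerical_value = []
--     for i in name:
--         if i in word_mapping:
--             numerical_value.append(word_mapping[i])
--     return numerical_value
-- ===== SOURCE B (Python) =====
-- def name_to_numerical_value(name):
--     # Closed-form arithmetic instead of a 52-entry lookup table.
--     return [ord(c.upper()) - ord('A') + 1 for c in name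
--             if 'A' <= c <= 'Z' or 'a' <= c <= 'z']
-- ===== Notes on version B (the rewrite author's own statement) =====
-- stated objective: simpler
-- what changed: Replaced the 52-entry dict lookup with closed-form arithmetic on the character code guarded by an explicit ASCII-letter range test, expressed as a single comprehension instead of building a table and appending in a loop.
import Mathlib
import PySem

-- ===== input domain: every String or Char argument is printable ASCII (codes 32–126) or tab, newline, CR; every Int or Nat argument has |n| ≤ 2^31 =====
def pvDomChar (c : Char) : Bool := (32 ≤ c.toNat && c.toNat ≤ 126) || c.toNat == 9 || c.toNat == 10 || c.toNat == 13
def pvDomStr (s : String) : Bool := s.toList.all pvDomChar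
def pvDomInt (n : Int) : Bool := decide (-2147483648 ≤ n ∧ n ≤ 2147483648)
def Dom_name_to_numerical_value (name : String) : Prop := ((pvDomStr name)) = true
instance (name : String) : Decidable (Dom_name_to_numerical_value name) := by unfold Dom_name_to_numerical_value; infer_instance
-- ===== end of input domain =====

-- B replaces A's 52-entry lookup dict with closed-form arithmetic on the character code (simpler).

-- ===== PORT A =====
def pvWordMapping : PySem.Dict Char Int := PySem.Dict.ofList [
    ('A', 1), ('a', 1), ('B', 2), ('b', 2), ('C', 3), ('c', 3),
    ('D', 4), ('d', 4), ('E', 5), ('e', 5), ('F', 6), ('f', 6),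
    ('G', 7), ('g', 7), ('H', 8), ('h', 8), ('I', 9), ('i', 9),
    ('J', 10), ('j', 10), ('K', 11), ('k', 11), ('L', 12), ('l', 12),
    ('M', 13), ('m', 13), ('N', 14), ('n', 14), ('O', 15), ('o', 15),
    ('P', 16), ('p', 16), ('Q', 17), ('q', 17), ('R', 18), ('r', 18),
    ('S', 19), ('s', 19), ('T', 20), ('t', 20), ('U', 21), ('u', 21),
    ('V', 22), ('v', 22), ('W', 23), ('w', 23), ('X', 24), ('x', 24),
    ('Y', 25), ('y', 25), ('Z', 26), ('z', 26)]

-- the `.getD 0` is unreachable: the branch is only taken when the key is present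
def name_to_numerical_value (name : String) : List Int :=
  name.toList.foldl (fun acc c =>
    if pvWordMapping.contains c then acc ++ [(pvWordMapping.get? c).getD 0] else acc) []

-- ===== PORT B =====
def name_to_numerical_value_alt (name : String) : List Int :=
  name.toList.filterMap (fun c =>
    if ('A' ≤ c ∧ c ≤ 'Z') ∨ ('a' ≤ c ∧ c ≤ 'z') then
      some ((c.toUpper.toNat : Int) - 65 + 1)
    else none)

-- ===== PRECONDITION & SPEC =====
def Spec_name_to_numerical_value (name : String) (out : List Int) : Prop := out = name_to_numerical_value_alt name
instance (name : String) (out : List Int) : Decidable (Spec_name_to_numerical_value name out) := by unfold Spec_name_to_numerical_value; infer_instance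

-- ===== CLAIM (what is proved, stated in full; the proofs are below) =====
def Claim_equal_name_to_numerical_value : Prop := ∀ (name : String), Dom_name_to_numerical_value name → Spec_name_to_numerical_value name (name_to_numerical_value name)

-- ===== LEMMAS AND PROOFS =====
def pvStepB (c : Char) : Option Int :=
  if ('A' ≤ c ∧ c ≤ 'Z') ∨ ('a' ≤ c ∧ c ≤ 'z') then
    some ((c.toUpper.toNat : Int) - 65 + 1)
  else none

set_option maxRecDepth 4000 in
lemma pvStep_nat : ∀ n : Nat, n < 127 →
    (if pvWordMapping.contains (Char.ofNat n) then
       [((pvWordMapping.get? (Char.ofNat n)).getD 0)] else ([] : List Int))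
      = (pvStepB (Char.ofNat n)).toList := by decide

lemma pvStep_char (c : Char) (h : pvDomChar c = true) :
    (if pvWordMapping.contains c then [((pvWordMapping.get? c).getD 0)] else ([] : List Int))
      = (pvStepB c).toList := by
  have hlt : c.toNat < 127 := by
    simp [pvDomChar] at h; omega
  have := pvStep_nat c.toNat hlt
  rwa [Char.ofNat_toNat] at this

lemma pv_foldl_eq (l : List Char) (acc : List Int) (h : l.all pvDomChar = true) :
    l.foldl (fun acc c =>
      if pvWordMapping.contains c then acc ++ [(pvWordMapping.get? c).getD 0] else acc) acc
      = acc ++ l.filterMap pvStepB := by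
  induction l generalizing acc with
  | nil => simp
  | cons c t ih =>
    simp only [List.all_cons, Bool.and_eq_true] at h
    have hc := pvStep_char c h.1
    have hstep : (if pvWordMapping.contains c then acc ++ [(pvWordMapping.get? c).getD 0] else acc)
        = acc ++ (pvStepB c).toList := by
      rw [← hc]; split <;> simp
    simp only [List.foldl_cons, hstep, ih _ h.2, List.filterMap_cons]
    cases pvStepB c <;> simp

-- ===== VERDICT (by name: the statement is the Claim_ definition above) =====
theorem name_to_numerical_value_spec : Claim_equal_name_to_numerical_value := by
  intro name hdom
  unfold Spec_name_to_numerical_value name_to_numerical_value name_to_numerical_value_alt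
  rw [pv_foldl_eq _ _ hdom]
  simp [pvStepB]
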